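-- pv_equiv track=rewrite | github.com/OwenSanzas/Z-VulnSentinel | z_code_analyzer/svf/svf_dot_parser.py | get_typed_edge_list
-- ===== SOURCE A (Python) =====
-- def get_typed_edge_list(
--     initial_adj: dict[str, set[str]],
--     final_adj: dict[str, set[str]],
-- ) -> list[tuple[str, str, str]]:
--     """Classify edges as 'direct' or 'fptr' by diffing initial vs final graphs.
--
--     Args:
--         initial_adj: Adjacency from callgraph_initial.dot (direct calls only).
--         final_adj: Adjacency from callgraph_final.dot (all calls after pointer analysis).
--
--     Returns:
--         List of (caller, callee, call_type) where call_type is 'direct' or 'fptr'.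
--     """
--     edges: list[tuple[str, str, str]] = []
--     for caller, callees in sorted(final_adj.items()):
--         initial_callees = initial_adj.get(caller, set())
--         for callee in sorted(callees):
--             call_type = "direct" if callee in initial_callees else "fptr"
--             edges.append((caller, callee, call_type))
--     return edges
-- ===== SOURCE B (Python) =====
-- def get_typed_edge_list(
--     initial_adj: dict[str, set[str]],
--     final_adj: dict[str, set[str]],
-- ) -> list[tuple[str, str, str]]:
--     """Classify each caller's edges by a two-pointer merge of its two sorted
--     callee lists (no per-callee membership test)."""
--
--     def merge(caller, fin, ini):
--         out = []
--         i = j = 0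
--         while i < len(fin):
--             if j < len(ini) and ini[j] < fin[i]:
--                 j += 1
--             elif j < len(ini) and ini[j] == fin[i]:
--                 out.append((caller, fin[i], "direct"))
--                 i += 1
--                 j += 1
--             else:
--                 out.append((caller, fin[i], "fptr"))
--                 i += 1
--         return out
--
--     edges = []
--     for caller, callees in sorted(final_adj.items()):
--         edges += merge(caller, sorted(callees), sorted(initial_adj.get(caller, ())))
--     return edges
-- ===== Notes on version B (the rewrite author's own statement) =====
-- stated objective: alternative
-- what changed: B classifies each caller's edges by a two-pointer merge of the sorted final and sorted initial callee lists, emitting 'direct' on a match and 'fptr' otherwise, instead of A's per-callee set-membership test.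
import Mathlib
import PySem

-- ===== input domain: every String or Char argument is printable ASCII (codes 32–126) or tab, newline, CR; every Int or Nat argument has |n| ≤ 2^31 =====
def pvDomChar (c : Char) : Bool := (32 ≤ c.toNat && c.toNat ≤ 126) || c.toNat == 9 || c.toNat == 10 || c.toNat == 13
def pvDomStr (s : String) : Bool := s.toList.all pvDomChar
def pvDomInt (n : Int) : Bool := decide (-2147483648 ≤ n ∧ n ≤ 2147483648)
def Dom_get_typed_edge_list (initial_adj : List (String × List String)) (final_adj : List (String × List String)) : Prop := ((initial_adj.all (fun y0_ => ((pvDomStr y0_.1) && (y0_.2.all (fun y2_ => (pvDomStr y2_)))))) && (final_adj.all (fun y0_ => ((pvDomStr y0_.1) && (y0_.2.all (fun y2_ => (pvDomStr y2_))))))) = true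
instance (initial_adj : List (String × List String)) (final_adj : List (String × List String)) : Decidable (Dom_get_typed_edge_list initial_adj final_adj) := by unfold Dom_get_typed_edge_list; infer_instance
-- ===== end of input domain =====

-- B classifies each caller's edges by a two-pointer merge of the two sorted callee lists instead of A's per-callee set-membership test (alternative algorithm, same behaviour).


-- ===== PORT A =====
-- sorted(final_adj.items()): the keys of a Python dict are distinct, so sorting the
-- items by their key alone is exact (the set component is never compared).
def get_typed_edge_list (initial_adj : List (String × List String)) (final_adj : List (String × List String)) : List (String × String × String) :=
  (PySem.List.sorted final_adj (fun p => p.1)).foldl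
    (fun edges p =>
      let initial_callees : PySem.Set String := (PySem.Dict.mk initial_adj).getD p.1 []
      (PySem.List.sorted p.2 (fun c => c)).foldl
        (fun edges callee =>
          edges ++ [(p.1, callee,
            if PySem.Set.contains initial_callees callee then "direct" else "fptr")])
        edges)
    []

-- ===== PORT B =====
-- the two-pointer 'while i < len(fin)' merge of Source B, as the obvious structural
-- recursion on the two list suffixes fin[i:], ini[j:] (same state, same branch order)
def pvMergeB (caller : String) : List String → List String → List (String × String × String)
  | [], _ => []
  | f :: fs, [] => (caller, f, "fptr") :: pvMergeB caller fs []
  | f :: fs, g :: gs =>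
    if g < f then pvMergeB caller (f :: fs) gs
    else if g = f then (caller, f, "direct") :: pvMergeB caller fs gs
    else (caller, f, "fptr") :: pvMergeB caller fs (g :: gs)
termination_by fin ini => (fin.length, ini.length)

def get_typed_edge_list_alt (initial_adj : List (String × List String)) (final_adj : List (String × List String)) : List (String × String × String) :=
  (PySem.List.sorted final_adj (fun p => p.1)).foldl
    (fun edges p =>
      edges ++ pvMergeB p.1 (PySem.List.sorted p.2 (fun c => c))
        (PySem.List.sorted ((PySem.Dict.mk initial_adj).getD p.1 []) (fun c => c)))
    []

-- ===== PRECONDITION & SPEC =====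
-- Pre_ states the invariant of A's declared value type set[str]: the callee lists of
-- final_adj are duplicate-free. Every Python input satisfies it; it excludes only Lean
-- association lists that encode no Python dict of sets.
def Pre_get_typed_edge_list (initial_adj : List (String × List String)) (final_adj : List (String × List String)) : Prop :=
  ∀ p ∈ final_adj, p.2.Nodup
instance (initial_adj : List (String × List String)) (final_adj : List (String × List String)) : Decidable (Pre_get_typed_edge_list initial_adj final_adj) := by unfold Pre_get_typed_edge_list; infer_instance
def pvWitness_get_typed_edge_list : (List (String × List String)) × (List (String × List String)) :=
  ([("a", ["b"])], [("a", ["b", "c"]), ("b", ["a"])])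
def Spec_get_typed_edge_list (initial_adj : List (String × List String)) (final_adj : List (String × List String)) (out : List (String × String × String)) : Prop := out = get_typed_edge_list_alt initial_adj final_adj
instance (initial_adj : List (String × List String)) (final_adj : List (String × List String)) (out : List (String × String × String)) : Decidable (Spec_get_typed_edge_list initial_adj final_adj out) := by unfold Spec_get_typed_edge_list; infer_instance

-- ===== CLAIM =====
def Claim_equal_get_typed_edge_list : Prop := ∀ (initial_adj : List (String × List String)) (final_adj : List (String × List String)), Dom_get_typed_edge_list initial_adj final_adj → Pre_get_typed_edge_list initial_adj final_adj → Spec_get_typed_edge_list initial_adj final_adj (get_typed_edge_list initial_adj final_adj)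

-- ===== LEMMAS AND PROOFS =====

-- merge correctness: on a strictly increasing fin and a weakly increasing ini, the
-- two-pointer merge is exactly the tagging map A computes with a membership test
theorem pvMergeB_eq (caller : String) : ∀ (fin ini : List String),
    fin.Pairwise (· < ·) → ini.Pairwise (· ≤ ·) →
    pvMergeB caller fin ini =
      fin.map (fun c => (caller, c, if c ∈ ini then "direct" else "fptr")) := by
  intro fin ini hf hi
  induction fin, ini using pvMergeB.induct with
  | case1 ini => simp [pvMergeB]
  | case2 f fs ih =>
      rw [pvMergeB, ih (List.Pairwise.of_cons hf) List.Pairwise.nil]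
      simp
  | case3 f fs g gs hlt ih =>
      rw [pvMergeB, if_pos hlt, ih hf (List.Pairwise.of_cons hi)]
      refine List.map_congr_left ?_
      intro c hc
      have hgc : g < c := by
        rcases List.mem_cons.1 hc with rfl | hc
        · exact hlt
        · exact lt_trans hlt ((List.pairwise_cons.1 hf).1 c hc)
      simp [List.mem_cons, hgc.ne']
  | case4 fs g gs hnlt ih =>
      rw [pvMergeB, if_neg hnlt, if_pos rfl, List.map_cons,
        ih (List.Pairwise.of_cons hf) (List.Pairwise.of_cons hi)]
      congr 1
      · simp
      refine List.map_congr_left ?_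
      intro c hc
      have hgc : g < c := (List.pairwise_cons.1 hf).1 c hc
      simp [List.mem_cons, hgc.ne']
  | case5 f fs g gs hnlt hne ih =>
      have hfg : f < g := lt_of_le_of_ne (not_lt.1 hnlt) (fun h => hne h.symm)
      rw [pvMergeB, if_neg hnlt, if_neg hne, List.map_cons,
        ih (List.Pairwise.of_cons hf) hi]
      congr 1
      have hnm : f ∉ g :: gs := by
        intro hm
        rcases List.mem_cons.1 hm with rfl | hm
        · exact lt_irrefl f hfg
        · exact lt_irrefl f (lt_of_lt_of_le hfg ((List.pairwise_cons.1 hi).1 f hm))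
      simp [hnm]

-- per caller: B's merge of the two sorted lists is A's inner tagging loop
theorem pvInner_eq (initial_adj : List (String × List String)) (p : String × List String)
    (hnd : p.2.Nodup) :
    pvMergeB p.1 (PySem.List.sorted p.2 (fun c => c))
      (PySem.List.sorted ((PySem.Dict.mk initial_adj).getD p.1 []) (fun c => c)) =
    (PySem.List.sorted p.2 (fun c => c)).map
      (fun c => (p.1, c,
        if PySem.Set.contains ((PySem.Dict.mk initial_adj).getD p.1 []) c
        then "direct" else "fptr")) := by
  have hfin : (PySem.List.sorted p.2 (fun c => c)).Pairwise (· < ·) := by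
    have hle := PySem.List.sorted_pairwise p.2 (fun c => c)
    have hnd' : (PySem.List.sorted p.2 (fun c => c)).Nodup :=
      ((PySem.List.sorted_perm p.2 (fun c => c) false).nodup_iff).2 hnd
    rw [List.nodup_iff_pairwise_ne] at hnd'
    exact (hle.and hnd').imp (fun h => lt_of_le_of_ne h.1 h.2)
  rw [pvMergeB_eq _ _ _ hfin (PySem.List.sorted_pairwise _ _)]
  refine List.map_congr_left ?_
  intro c _
  have : (c ∈ PySem.List.sorted ((PySem.Dict.mk initial_adj).getD p.1 []) (fun c => c)) ↔
      PySem.Set.contains ((PySem.Dict.mk initial_adj).getD p.1 []) c = true := by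
    rw [(PySem.List.sorted_perm _ (fun c => c) false).mem_iff, PySem.Set.contains_iff]
  by_cases hm : PySem.Set.contains ((PySem.Dict.mk initial_adj).getD p.1 []) c = true
  · simp [this.2 hm, (PySem.Set.contains_iff _ _).1 hm]
  · simp

-- ===== VERDICT =====
theorem get_typed_edge_list_spec : Claim_equal_get_typed_edge_list := by
  intro initial_adj final_adj _ hpre
  show get_typed_edge_list initial_adj final_adj = get_typed_edge_list_alt initial_adj final_adj
  unfold get_typed_edge_list get_typed_edge_list_alt
  refine PySem.List.foldl_congr_mem _ _ _ _ ?_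
  intro acc p hp
  have hnd : p.2.Nodup := hpre p ((PySem.List.mem_sorted _ _ _ _).1 hp)
  simp only [PySem.List.foldl_append_singleton_eq_map, pvInner_eq initial_adj p hnd]
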